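-- pv_equiv track=rewrite | github.com/MaxDzioban/adventofcode | day_5_year_2015.py | has_repeated_pair
-- ===== SOURCE A (Python) =====
-- def has_repeated_pair(s):
--     pairs = {}
--     for i in range(len(s) - 1):
--         pair = s[i:i+2]
--         if pair in pairs:
--             if i - pairs[pair] >= 2:
--                 return True
--         else:
--             pairs[pair] = i
--     return False
-- ===== SOURCE B (Python) =====
-- def has_repeated_pair(s):
--     return any(s[i:i+2] in s[i+2:] for i in range(len(s) - 1))
-- ===== Notes on version B (the rewrite author's own statement) =====
-- stated objective: idiomatic
-- what changed: Replaced the dict of first pair indices with the one-line substring-search idiom: for each i, check whether s[i:i+2] occurs in the suffix s[i+2:].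
import Mathlib
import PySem

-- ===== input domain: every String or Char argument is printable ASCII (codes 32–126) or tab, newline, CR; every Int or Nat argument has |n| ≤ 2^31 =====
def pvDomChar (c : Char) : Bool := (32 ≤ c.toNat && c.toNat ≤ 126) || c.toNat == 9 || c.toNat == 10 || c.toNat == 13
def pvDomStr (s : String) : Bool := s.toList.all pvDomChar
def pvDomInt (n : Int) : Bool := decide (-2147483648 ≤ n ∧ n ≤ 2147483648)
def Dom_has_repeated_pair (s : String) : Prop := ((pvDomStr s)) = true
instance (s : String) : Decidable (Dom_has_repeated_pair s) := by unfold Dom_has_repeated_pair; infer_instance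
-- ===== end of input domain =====

-- B replaces A's dict of first pair indices by the idiomatic substring-search one-liner
-- (for each i, is s[i:i+2] in s[i+2:]); same return value, no speed claim.

-- ===== PORT A =====
-- A's loop over range(len(s)-1) carrying the dict: early return True becomes `true`,
-- falling off the index list becomes `false`.
def aGo (l : List Char) : List Nat → PySem.Dict (List Char) Int → Bool
  | [], _ => false
  | i :: rest, d =>
    let pair := PySem.List.slice l (some (i : Int)) (some ((i : Int) + 2))
    match d.get? pair with
    | some p => if (i : Int) - p ≥ 2 then true else aGo l rest d
    | none => aGo l rest (d.insert pair (i : Int))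

def has_repeated_pair (s : String) : Bool :=
  aGo s.toList (List.range (s.toList.length - 1)) PySem.Dict.empty

-- ===== PORT B =====
def has_repeated_pair_alt (s : String) : Bool :=
  (List.range (s.toList.length - 1)).any fun i =>
    PySem.Chars.isIn (PySem.List.slice s.toList (some (i : Int)) (some ((i : Int) + 2)))
      (PySem.List.slice s.toList (some ((i : Int) + 2)) none)

-- ===== PRECONDITION & SPEC =====
def Spec_has_repeated_pair (s : String) (out : Bool) : Prop := out = has_repeated_pair_alt s
instance (s : String) (out : Bool) : Decidable (Spec_has_repeated_pair s out) := by unfold Spec_has_repeated_pair; infer_instance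

-- ===== CLAIM (what is proved, stated in full; the proofs are below) =====
def Claim_equal_has_repeated_pair : Prop := ∀ (s : String), Dom_has_repeated_pair s → Spec_has_repeated_pair s (has_repeated_pair s)

-- ===== LEMMAS AND PROOFS =====

-- the two-character window starting at i
def pr (l : List Char) (i : Nat) : List Char := (l.drop i).take 2

-- the common specification: some window repeats at distance ≥ 2, inside the string
def RSpec (l : List Char) : Prop :=
  ∃ q i : Nat, q + 2 ≤ i ∧ i + 2 ≤ l.length ∧ pr l q = pr l i

lemma slice_pair (l : List Char) (i : Nat) :
    PySem.List.slice l (some (i : Int)) (some ((i : Int) + 2)) = pr l i := by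
  have h := PySem.List.slice_natCast_add l i 2
  simpa [pr] using h

lemma slice_suffix (l : List Char) (i : Nat) :
    PySem.List.slice l (some ((i : Int) + 2)) none = l.drop (i + 2) := by
  have h := PySem.List.slice_from_natCast l (i + 2)
  push_cast at h
  exact h

lemma pr_length (l : List Char) (i : Nat) (h : i + 2 ≤ l.length) : (pr l i).length = 2 := by
  simp [pr, List.length_take, List.length_drop]
  omega

lemma prefix_pr (l : List Char) (i m : Nat) (h : i + 2 ≤ l.length) :
    pr l i <+: l.drop m ↔ m + 2 ≤ l.length ∧ pr l i = pr l m := by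
  constructor
  · intro hp
    have he := List.prefix_iff_eq_take.mp hp
    rw [pr_length l i h] at he
    have hpp : pr l i = pr l m := he
    refine ⟨?_, hpp⟩
    have hlen := congrArg List.length hpp
    rw [pr_length l i h] at hlen
    simp [pr, List.length_take, List.length_drop] at hlen
    omega
  · rintro ⟨_, he⟩
    rw [List.prefix_iff_eq_take, pr_length l i h]
    exact he

-- B = true ↔ RSpec
lemma B_iff (s : String) : has_repeated_pair_alt s = true ↔ RSpec s.toList := by
  unfold has_repeated_pair_alt
  rw [List.any_eq_true]
  constructor
  · rintro ⟨i, hi, hin⟩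
    rw [List.mem_range] at hi
    have hi2 : i + 2 ≤ s.toList.length := by omega
    rw [slice_pair, slice_suffix, ← PySem.Chars.exists_prefix_drop_iff_isIn] at hin
    obtain ⟨j, hj⟩ := hin
    rw [List.drop_drop, prefix_pr _ _ _ hi2] at hj
    exact ⟨i, i + 2 + j, by omega, hj.1, hj.2⟩
  · rintro ⟨q, i, hqi, hin, he⟩
    refine ⟨q, List.mem_range.mpr (by omega), ?_⟩
    rw [slice_pair, slice_suffix, ← PySem.Chars.exists_prefix_drop_iff_isIn]
    refine ⟨i - (q + 2), ?_⟩
    rw [List.drop_drop]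
    have : q + 2 + (i - (q + 2)) = i := by omega
    rw [this, prefix_pr _ _ _ (by omega)]
    exact ⟨hin, he⟩

-- invariant: d maps each window to the index of its first occurrence below k
def DInv (l : List Char) (k : Nat) (d : PySem.Dict (List Char) Int) : Prop :=
  ∀ pr0 p, d.get? pr0 = some p ↔
    ∃ pn : Nat, p = (pn : Int) ∧ pn < k ∧ pr l pn = pr0 ∧ ∀ q < pn, pr l q ≠ pr0

-- if a window occurs below k, it has a first occurrence below k
lemma exists_first (l : List Char) (k : Nat) (pr0 : List Char)
    (h : ∃ q, q < k ∧ pr l q = pr0) :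
    ∃ pn, pn < k ∧ pr l pn = pr0 ∧ ∀ q < pn, pr l q ≠ pr0 := by
  obtain ⟨q, hq, he⟩ := h
  have hex : ∃ q, pr l q = pr0 := ⟨q, he⟩
  refine ⟨Nat.find hex, ?_, Nat.find_spec hex, fun q' hq' => Nat.find_min hex hq'⟩
  exact lt_of_le_of_lt (Nat.find_min' hex he) hq

lemma A_loop (l : List Char) (m : Nat) :
    ∀ k d, DInv l k d →
      (aGo l (List.range' k m) d = true ↔
        ∃ i, k ≤ i ∧ i < k + m ∧ ∃ q, q + 2 ≤ i ∧ pr l q = pr l i) := by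
  induction m with
  | zero =>
    intro k d _
    simp [aGo]
    omega
  | succ m ih =>
    intro k d hinv
    rw [List.range'_succ]
    show (match d.get? (PySem.List.slice l (some (k : Int)) (some ((k : Int) + 2))) with
      | some p => if (k : Int) - p ≥ 2 then true else aGo l (List.range' (k+1) m) d
      | none => aGo l (List.range' (k+1) m)
          (d.insert (PySem.List.slice l (some (k : Int)) (some ((k : Int) + 2))) (k : Int))) = true ↔ _
    rw [slice_pair]
    cases hget : d.get? (pr l k) with
    | some p =>
      obtain ⟨pn, rfl, hpk, hpe, hpmin⟩ := (hinv _ _).mp hget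
      by_cases hfar : (k : Int) - (pn : Int) ≥ 2
      · simp only [hfar, if_pos]
        constructor
        · intro _
          exact ⟨k, le_refl k, by omega, pn, by omega, hpe⟩
        · intro _; trivial
      · simp only [hfar, if_neg, not_false_eq_true]
        have hpn : pn + 1 = k := by omega
        have hinv' : DInv l (k + 1) d := by
          intro pr1 p1
          rw [hinv pr1 p1]
          constructor
          · rintro ⟨pn1, rfl, h1, h2, h3⟩
            exact ⟨pn1, rfl, by omega, h2, h3⟩
          · rintro ⟨pn1, rfl, h1, h2, h3⟩
            refine ⟨pn1, rfl, ?_, h2, h3⟩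
            rcases Nat.lt_or_ge pn1 k with h | h
            · exact h
            · exfalso
              have : pn1 = k := by omega
              subst this
              exact h3 pn hpk (hpe.trans h2)
        rw [ih (k + 1) d hinv']
        constructor
        · rintro ⟨i, h1, h2, q, h3, h4⟩
          exact ⟨i, by omega, by omega, q, h3, h4⟩
        · rintro ⟨i, h1, h2, q, h3, h4⟩
          refine ⟨i, ?_, by omega, q, h3, h4⟩
          rcases Nat.lt_or_ge k i with h | h
          · omega
          · exfalso
            have hik : i = k := by omega
            subst hik
            exact hpmin q (by omega) h4
    | none =>
      have hno : ∀ q < k, pr l q ≠ pr l k := by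
        intro q hq he
        obtain ⟨pn, h1, h2, h3⟩ := exists_first l k (pr l k) ⟨q, hq, he⟩
        have := (hinv (pr l k) (pn : Int)).mpr ⟨pn, rfl, h1, h2, h3⟩
        rw [hget] at this
        simp at this
      have hinv' : DInv l (k + 1) (d.insert (pr l k) (k : Int)) := by
        intro pr1 p1
        by_cases hpr : pr1 = pr l k
        · subst hpr
          rw [PySem.Dict.get?_insert_self]
          constructor
          · rintro h
            injection h with h; subst h
            exact ⟨k, rfl, by omega, rfl, hno⟩
          · rintro ⟨pn1, rfl, h1, h2, _⟩
            have : pn1 = k := by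
              rcases Nat.lt_or_ge pn1 k with h | h
              · exact absurd h2 (hno pn1 h)
              · omega
            subst this; rfl
        · rw [PySem.Dict.get?_insert_of_ne d (k : Int) hpr, hinv pr1 p1]
          constructor
          · rintro ⟨pn1, rfl, h1, h2, h3⟩
            exact ⟨pn1, rfl, by omega, h2, h3⟩
          · rintro ⟨pn1, rfl, h1, h2, h3⟩
            refine ⟨pn1, rfl, ?_, h2, h3⟩
            rcases Nat.lt_or_ge pn1 k with h | h
            · exact h
            · exfalso; exact hpr (h2.symm.trans (congrArg (pr l) (show pn1 = k by omega)))
      rw [ih (k + 1) _ hinv']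
      constructor
      · rintro ⟨i, h1, h2, q, h3, h4⟩
        exact ⟨i, by omega, by omega, q, h3, h4⟩
      · rintro ⟨i, h1, h2, q, h3, h4⟩
        refine ⟨i, ?_, by omega, q, h3, h4⟩
        rcases Nat.lt_or_ge k i with h | h
        · omega
        · exfalso
          have hik : i = k := by omega
          subst hik
          exact hno q (by omega) h4

lemma A_iff (s : String) : has_repeated_pair s = true ↔ RSpec s.toList := by
  unfold has_repeated_pair
  rw [List.range_eq_range']
  rw [A_loop s.toList (s.toList.length - 1) 0 PySem.Dict.empty
    (by intro pr0 p; rw [PySem.Dict.get?_empty]; simp)]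
  constructor
  · rintro ⟨i, _, h2, q, h3, h4⟩
    exact ⟨q, i, h3, by omega, h4⟩
  · rintro ⟨q, i, h1, h2, h3⟩
    exact ⟨i, by omega, by omega, q, h1, h3⟩

-- ===== VERDICT (by name: the statement is the Claim_ definition above) =====
theorem has_repeated_pair_spec : Claim_equal_has_repeated_pair := by
  intro s _
  unfold Spec_has_repeated_pair
  have hA := A_iff s
  have hB := B_iff s
  cases hvb : has_repeated_pair_alt s
  · cases hva : has_repeated_pair s
    · rfl
    · exact absurd (hB.mpr (hA.mp hva)) (by simp [hvb])
  · exact hA.mpr (hB.mp hvb)
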